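-- pv_equiv track=rewrite | github.com/RagenIV/GSOMpy | lesson_09/random1000.py | count_negative
-- ===== SOURCE A (Python) =====
-- def count_negative(L):
--     A = L.index(min(L))
--     B = L.index(max(L))
--     if B < A:
--         B, A = A, B
--     neg = 0
--     for i in range(A, B+1):
--         if L[i] < 0:
--             neg += 1
--     return neg
-- ===== SOURCE B (Python) =====
-- def count_negative(L):
--     pref = [0]          # pref[k] = number of negatives in L[:k]
--     mi = ma = 0
--     for i, x in enumerate(L):
--         pref.append(pref[-1] + (1 if x < 0 else 0))
--         if x < L[mi]:
--             mi = i
--         if x > L[ma]: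
--             ma = i
--     a, b = (mi, ma) if mi <= ma else (ma, mi)
--     return pref[b + 1] - pref[a]
-- ===== Notes on version B (the rewrite author's own statement) =====
-- stated objective: alternative
-- what changed: One pass builds a prefix-sum table of negative counts while tracking the first indices of min and max, and the answer is an O(1) subtraction pref[b+1]-pref[a]; A's four separate scans (min, max, two .index) and its explicit window-counting loop disappear.
-- outside the precondition, e.g. on count_negative([]): A raises ValueError, B raises IndexError
import Mathlib
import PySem

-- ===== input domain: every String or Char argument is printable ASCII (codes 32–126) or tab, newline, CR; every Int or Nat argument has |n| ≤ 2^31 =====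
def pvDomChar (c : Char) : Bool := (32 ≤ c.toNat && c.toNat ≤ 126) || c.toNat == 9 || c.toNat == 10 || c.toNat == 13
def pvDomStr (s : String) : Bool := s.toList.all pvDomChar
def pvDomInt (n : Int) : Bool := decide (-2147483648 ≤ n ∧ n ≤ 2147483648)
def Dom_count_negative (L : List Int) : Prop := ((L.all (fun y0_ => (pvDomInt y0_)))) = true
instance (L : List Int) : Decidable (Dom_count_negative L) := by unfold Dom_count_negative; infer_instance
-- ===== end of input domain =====

-- B replaces A's four separate scans plus explicit window-counting loop by one
-- pass that builds a prefix-sum table of negative counts while tracking the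
-- first indices of min and max; the answer is the O(1) subtraction
-- pref[b+1] - pref[a] (objective: alternative algorithm/data structure).


-- ===== PORT A =====
def count_negative (L : List Int) : Int :=
  let A : Int := (((PySem.List.index? L ((PySem.List.min? L (fun y => y)).getD 0)).getD 0 : Nat) : Int)
  let B : Int := (((PySem.List.index? L ((PySem.List.max? L (fun y => y)).getD 0)).getD 0 : Nat) : Int)
  let AB : Int × Int := if B < A then (B, A) else (A, B)
  (PySem.List.pyRange AB.1 (AB.2 + 1) 1).foldl
    (fun neg i => if PySem.List.pyGetD L i 0 < 0 then neg + 1 else neg) 0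

-- ===== PORT B =====
-- the three independent updates of Source B's loop body
def cnStepPref (pref : List Int) (ix : Int × Int) : List Int :=
  pref ++ [PySem.List.pyGetD pref (-1) 0 + (if ix.2 < 0 then 1 else 0)]
def cnStepMin (L : List Int) (mi : Int) (ix : Int × Int) : Int :=
  if ix.2 < PySem.List.pyGetD L mi 0 then ix.1 else mi
def cnStepMax (L : List Int) (ma : Int) (ix : Int × Int) : Int :=
  if ix.2 > PySem.List.pyGetD L ma 0 then ix.1 else ma

def count_negative_alt (L : List Int) : Int :=
  let s := (PySem.List.enumerate L 0).foldl
      (fun (s : List Int × Int × Int) ix =>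
        (cnStepPref s.1 ix, cnStepMin L s.2.1 ix, cnStepMax L s.2.2 ix)) ([0], 0, 0)
  let ab : Int × Int := if s.2.1 ≤ s.2.2 then (s.2.1, s.2.2) else (s.2.2, s.2.1)
  PySem.List.pyGetD s.1 (ab.2 + 1) 0 - PySem.List.pyGetD s.1 ab.1 0

-- ===== PRECONDITION & SPEC =====
-- Pre_ excludes only the empty list, on which Python's min([]) raises ValueError (and B's pref[b+1] an IndexError).
def Pre_count_negative (L : List Int) : Prop := L ≠ []
instance (L : List Int) : Decidable (Pre_count_negative L) := by unfold Pre_count_negative; infer_instance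
def pvWitness_count_negative : List Int := [3, -2, 0, -1, 5]

def Spec_count_negative (L : List Int) (out : Int) : Prop := out = count_negative_alt L
instance (L : List Int) (out : Int) : Decidable (Spec_count_negative L out) := by unfold Spec_count_negative; infer_instance

-- ===== CLAIM (what is proved, stated in full; the proofs are below) =====
def Claim_equal_count_negative : Prop := ∀ (L : List Int), Dom_count_negative L → Pre_count_negative L → Spec_count_negative L (count_negative L)

-- ===== LEMMAS AND PROOFS =====

theorem idxOf?_eq_some_of_mem {x : Int} {l : List Int} (h : x ∈ l) :
    List.idxOf? x l = some (List.idxOf x l) := by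
  induction l with
  | nil => simp at h
  | cons a t ih =>
    by_cases hx : a = x
    · simp [hx, List.idxOf?, List.idxOf, List.findIdx?_cons, List.findIdx_cons]
    · have h' : x ∈ t := by
        rcases List.mem_cons.mp h with h1 | h1
        · exact absurd h1.symm hx
        · exact h1
      have := ih h'
      simp [List.idxOf?, List.idxOf, List.findIdx?_cons, List.findIdx_cons, hx] at this ⊢
      refine ⟨_, this, ?_⟩
      have hb : (a == x) = false := by simp [hx]
      simp [hb]

theorem foldl_triple_indep (f : List Int → Int × Int → List Int)
    (g h : Int → Int × Int → Int) (l : List (Int × Int)) (a : List Int) (b c : Int) :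
    l.foldl (fun (s : List Int × Int × Int) ix => (f s.1 ix, g s.2.1 ix, h s.2.2 ix)) (a, b, c)
      = (l.foldl f a, l.foldl g b, l.foldl h c) := by
  induction l generalizing a b c with
  | nil => rfl
  | cons x t ih => simpa using ih (f a x) (g b x) (h c x)

def negStep (n x : Int) : Int := n + (if x < 0 then 1 else 0)

theorem pref_fold_scanl (l : List (Int × Int)) :
    ∀ (acc : List Int) (c : Int),
    l.foldl cnStepPref (acc ++ [c]) = acc ++ List.scanl negStep c (l.map Prod.snd) := by
  induction l with
  | nil => intro acc c; simp [List.scanl]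
  | cons x t ih =>
    intro acc c
    have hstep : cnStepPref (acc ++ [c]) x = (acc ++ [c]) ++ [negStep c x.2] := by
      simp [cnStepPref, PySem.List.pyGetD_neg_one_append_singleton, negStep]
    simp only [List.foldl_cons, hstep]
    rw [ih (acc ++ [c]) (negStep c x.2)]
    simp [List.scanl]

theorem scanl_getD_take (l : List Int) :
    ∀ (c : Int) (k : Nat), k ≤ l.length →
    (List.scanl negStep c l).getD k 0 = (l.take k).foldl negStep c := by
  induction l with
  | nil =>
    intro c k hk
    have hk0 : k = 0 := by simpa using hk
    subst hk0
    simp [List.scanl]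
  | cons x t ih =>
    intro c k hk
    cases k with
    | zero => simp [List.scanl]
    | succ k =>
      rw [List.scanl_cons, List.getD_cons_succ, List.take_succ_cons, List.foldl_cons]
      exact ih (negStep c x) k (by simpa using hk)

theorem getD_idx_of_prefix (L p l : List Int) (v : Int) (hL : L = p ++ l) (hv : v ∈ p) :
    PySem.List.pyGetD L ((List.idxOf v p : Nat) : Int) 0 = v := by
  have hlt : List.idxOf v p < p.length := List.idxOf_lt_length_of_mem hv
  have hltL : List.idxOf v p < L.length := by
    subst hL; simp; omega
  rw [PySem.List.pyGetD_natCast, List.getD_eq_getElem L 0 hltL]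
  subst hL
  rw [List.getElem_append_left hlt]
  exact List.getElem_idxOf hlt

theorem argmin_inv (L : List Int) (l : List Int) :
    ∀ (p : List Int) (v : Int), L = p ++ l → v ∈ p → (∀ y ∈ p, v ≤ y) →
    (PySem.List.enumerate l (p.length : Int)).foldl (cnStepMin L) ((List.idxOf v p : Nat) : Int)
      = ((List.idxOf (l.foldl min v) L : Nat) : Int) := by
  induction l with
  | nil =>
    intro p v hL hv _
    subst hL; simp
  | cons x t ih =>
    intro p v hL hv hmin
    rw [PySem.List.enumerate_cons]
    simp only [List.foldl_cons]
    have hget := getD_idx_of_prefix L p (x :: t) v hL hv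
    by_cases hx : x < v
    · have hxne : x ∉ p := fun hmem => absurd (hmin x hmem) (by omega)
      have hidx : List.idxOf x (p ++ [x]) = p.length := by
        rw [List.idxOf_append]; simp [hxne]
      have hstep : cnStepMin L ((List.idxOf v p : Nat) : Int) ((p.length : Int), x)
          = ((List.idxOf x (p ++ [x]) : Nat) : Int) := by
        simp [cnStepMin, hget, hx, hidx]
      rw [hstep]
      have hL' : L = (p ++ [x]) ++ t := by simp [hL]
      have hlen : ((p.length : Int) + 1) = (((p ++ [x]).length : Nat) : Int) := by
        simp
      rw [hlen]
      have := ih (p ++ [x]) x hL' (by simp) (by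
        intro y hy
        rcases List.mem_append.mp hy with h1 | h1
        · have := hmin y h1; omega
        · simp at h1; omega)
      rw [this]
      have : min v x = x := by omega
      simp [this]
    · have hidx : List.idxOf v (p ++ [x]) = List.idxOf v p := by
        rw [List.idxOf_append]; simp [hv]
      have hstep : cnStepMin L ((List.idxOf v p : Nat) : Int) ((p.length : Int), x)
          = ((List.idxOf v (p ++ [x]) : Nat) : Int) := by
        simp [cnStepMin, hget, hx, hidx]
      rw [hstep]
      have hL' : L = (p ++ [x]) ++ t := by simp [hL]
      have hlen : ((p.length : Int) + 1) = (((p ++ [x]).length : Nat) : Int) := by simp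
      rw [hlen]
      have := ih (p ++ [x]) v hL' (by simp [hv]) (by
        intro y hy
        rcases List.mem_append.mp hy with h1 | h1
        · exact hmin y h1
        · simp at h1; omega)
      rw [this]
      have : min v x = v := by omega
      simp [this]

theorem argmax_inv (L : List Int) (l : List Int) :
    ∀ (p : List Int) (v : Int), L = p ++ l → v ∈ p → (∀ y ∈ p, y ≤ v) →
    (PySem.List.enumerate l (p.length : Int)).foldl (cnStepMax L) ((List.idxOf v p : Nat) : Int)
      = ((List.idxOf (l.foldl max v) L : Nat) : Int) := by
  induction l with
  | nil =>
    intro p v hL hv _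
    subst hL; simp
  | cons x t ih =>
    intro p v hL hv hmax
    rw [PySem.List.enumerate_cons]
    simp only [List.foldl_cons]
    have hget := getD_idx_of_prefix L p (x :: t) v hL hv
    by_cases hx : x > v
    · have hxne : x ∉ p := fun hmem => absurd (hmax x hmem) (by omega)
      have hidx : List.idxOf x (p ++ [x]) = p.length := by
        rw [List.idxOf_append]; simp [hxne]
      have hstep : cnStepMax L ((List.idxOf v p : Nat) : Int) ((p.length : Int), x)
          = ((List.idxOf x (p ++ [x]) : Nat) : Int) := by
        simp [cnStepMax, hget, hx, hidx]
      rw [hstep]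
      have hL' : L = (p ++ [x]) ++ t := by simp [hL]
      have hlen : ((p.length : Int) + 1) = (((p ++ [x]).length : Nat) : Int) := by simp
      rw [hlen]
      have := ih (p ++ [x]) x hL' (by simp) (by
        intro y hy
        rcases List.mem_append.mp hy with h1 | h1
        · have := hmax y h1; omega
        · simp at h1; omega)
      rw [this]
      have : max v x = x := by omega
      simp [this]
    · have hidx : List.idxOf v (p ++ [x]) = List.idxOf v p := by
        rw [List.idxOf_append]; simp [hv]
      have hstep : cnStepMax L ((List.idxOf v p : Nat) : Int) ((p.length : Int), x)
          = ((List.idxOf v (p ++ [x]) : Nat) : Int) := by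
        simp [cnStepMax, hget, hx, hidx]
      rw [hstep]
      have hL' : L = (p ++ [x]) ++ t := by simp [hL]
      have hlen : ((p.length : Int) + 1) = (((p ++ [x]).length : Nat) : Int) := by simp
      rw [hlen]
      have := ih (p ++ [x]) v hL' (by simp [hv]) (by
        intro y hy
        rcases List.mem_append.mp hy with h1 | h1
        · exact hmax y h1
        · simp at h1; omega)
      rw [this]
      have : max v x = v := by omega
      simp [this]

-- A's index window scan equals a difference of prefix negative counts.
theorem window_eq_pref_diff (L : List Int) (lo hi : Nat) (hlo : lo ≤ hi) (hhi : hi < L.length) :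
    (PySem.List.pyRange (lo : Int) ((hi : Int) + 1) 1).foldl
        (fun neg i => if PySem.List.pyGetD L i 0 < 0 then neg + 1 else neg) (0 : Int)
      = (L.take (hi + 1)).foldl negStep 0 - (L.take lo).foldl negStep 0 := by
  set n : Nat := hi + 1 - lo with hn
  have hwin : (PySem.List.pyRange (lo : Int) ((hi : Int) + 1) 1).foldl
        (fun neg i => if PySem.List.pyGetD L i 0 < 0 then neg + 1 else neg) (0 : Int)
      = ((L.drop lo).take n).foldl negStep 0 := by
    have hcast : ((hi : Int) + 1) = (((hi + 1 : Nat) : Nat) : Int) := by push_cast; ring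
    have hslice : List.take n (List.drop lo L) =
        (List.range n).map (fun (k : Nat) => PySem.List.pyGetD L ((lo : Int) + (k : Int)) 0) := by
      apply List.ext_getElem
      · simp [hn]; omega
      · intro k h1 h2
        have hk : k < n := by simpa using h2
        have hlk : lo + k < L.length := by omega
        simp only [List.getElem_take, List.getElem_drop, List.getElem_map, List.getElem_range]
        have : ((lo : Int) + (k : Int)) = (((lo + k : Nat) : Nat) : Int) := by push_cast; ring
        rw [this, PySem.List.pyGetD_natCast, List.getD_eq_getElem L 0 hlk]
    rw [hslice, List.foldl_map, hcast, PySem.List.pyRange_one]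
    have hrn : (((hi + 1 : Nat) : Int) - (lo : Int)).toNat = n := by omega
    rw [hrn, List.foldl_map]
    congr 1
    funext b j
    simp only [negStep]
    split_ifs <;> ring
  rw [hwin]
  have hsplit : L.take (hi + 1) = L.take lo ++ (L.drop lo).take n := by
    have : hi + 1 = lo + n := by omega
    rw [this, List.take_add]
  rw [hsplit, List.foldl_append]
  have hshift : ∀ (v : List Int) (c : Int), v.foldl negStep c = c + v.foldl negStep 0 := by
    intro v c
    have he : negStep = fun (n y : Int) => n + (if y < 0 then 1 else 0) := rfl
    rw [he, PySem.List.foldl_add, PySem.List.foldl_add]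
    ring
  rw [hshift ((L.drop lo).take n) ((L.take lo).foldl negStep 0)]
  ring

-- ===== VERDICT (by name: the statement is the Claim_ definition above) =====
theorem count_negative_spec : Claim_equal_count_negative := by
  intro L _ hpre
  unfold Spec_count_negative
  match L, hpre with
  | x :: t, _ =>
  set L := x :: t with hLdef
  -- characterize A's two indices
  have hmin? : PySem.List.min? L (fun y => y) = some (t.foldl min x) := PySem.List.min?_id_cons x t
  have hmax? : PySem.List.max? L (fun y => y) = some (t.foldl max x) := PySem.List.max?_id_cons x t
  set m : Int := t.foldl min x with hm
  set M : Int := t.foldl max x with hM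
  have hmmem : m ∈ L := PySem.List.min?_mem hmin?
  have hMmem : M ∈ L := PySem.List.max?_mem hmax?
  set im : Nat := List.idxOf m L with him
  set iM : Nat := List.idxOf M L with hiM
  have himlt : im < L.length := List.idxOf_lt_length_of_mem hmmem
  have hiMlt : iM < L.length := List.idxOf_lt_length_of_mem hMmem
  have hA : count_negative L =
      (PySem.List.pyRange (if (iM:Int) < (im:Int) then (iM:Int) else (im:Int))
          ((if (iM:Int) < (im:Int) then (im:Int) else (iM:Int)) + 1) 1).foldl
        (fun neg i => if PySem.List.pyGetD L i 0 < 0 then neg + 1 else neg) 0 := by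
    rw [count_negative]
    rw [hmin?, hmax?]
    simp only [Option.getD_some, PySem.List.index?_eq_idxOf?,
      idxOf?_eq_some_of_mem hmmem, idxOf?_eq_some_of_mem hMmem, Option.getD_some]
    rw [← him, ← hiM]
    by_cases hc : (iM : Int) < (im : Int) <;> simp [hc]
  -- characterize B's fold: prefix table and the two indices
  have hB0 : (PySem.List.enumerate L 0).foldl
      (fun (s : List Int × Int × Int) ix =>
        (cnStepPref s.1 ix, cnStepMin L s.2.1 ix, cnStepMax L s.2.2 ix)) ([0], 0, 0)
      = (List.scanl negStep 0 L, ((im : Nat) : Int), ((iM : Nat) : Int)) := by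
    rw [foldl_triple_indep]
    have hpref : (PySem.List.enumerate L 0).foldl cnStepPref [0] = List.scanl negStep 0 L := by
      have := pref_fold_scanl (PySem.List.enumerate L 0) [] 0
      simpa [PySem.List.map_snd_enumerate] using this
    have hcons : PySem.List.enumerate L 0 = (0, x) :: PySem.List.enumerate t 1 := by
      rw [hLdef, PySem.List.enumerate_cons]; norm_num
    have hget0 : PySem.List.pyGetD L (0 : Int) 0 = x := by
      rw [hLdef]; exact PySem.List.pyGetD_zero_cons x t 0
    have hsmin : cnStepMin L 0 (0, x) = 0 := by simp [cnStepMin, hget0]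
    have hsmax : cnStepMax L 0 (0, x) = 0 := by simp [cnStepMax, hget0]
    have hmineq : (PySem.List.enumerate t 1).foldl (cnStepMin L) 0 = ((im : Nat) : Int) := by
      have := argmin_inv L t [x] x (by simp [hLdef]) (by simp) (by simp)
      simpa [him, hm] using this
    have hmaxeq : (PySem.List.enumerate t 1).foldl (cnStepMax L) 0 = ((iM : Nat) : Int) := by
      have := argmax_inv L t [x] x (by simp [hLdef]) (by simp) (by simp)
      simpa [hiM, hM] using this
    rw [hpref, hcons]
    simp only [List.foldl_cons, hsmin, hsmax, hmineq, hmaxeq]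
  have hlenscan : (List.scanl negStep 0 L).length = L.length + 1 := by
    simp
  have hgetscan : ∀ (k : Nat), k ≤ L.length →
      PySem.List.pyGetD (List.scanl negStep 0 L) ((k : Nat) : Int) 0
        = (L.take k).foldl negStep 0 := by
    intro k hk
    rw [PySem.List.pyGetD_natCast]
    exact scanl_getD_take L 0 k hk
  have hBalt : ∀ (lo hi : Nat), lo ≤ hi → hi < L.length →
      PySem.List.pyGetD (List.scanl negStep 0 L) ((hi : Int) + 1) 0
        - PySem.List.pyGetD (List.scanl negStep 0 L) ((lo : Int)) 0
      = (L.take (hi + 1)).foldl negStep 0 - (L.take lo).foldl negStep 0 := by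
    intro lo hi hlh hhi
    have h1 : ((hi : Int) + 1) = (((hi + 1 : Nat) : Nat) : Int) := by push_cast; ring
    rw [h1, hgetscan (hi + 1) (by omega), hgetscan lo (by omega)]
  rw [hA]
  rw [count_negative_alt]
  simp only [hB0]
  by_cases hc : im ≤ iM
  · have h1 : ¬ ((iM:Int) < (im:Int)) := by omega
    have h2 : ((im : Nat) : Int) ≤ ((iM : Nat) : Int) := by omega
    simp only [h1, h2, if_pos, if_false]
    rw [hBalt im iM hc hiMlt]
    exact window_eq_pref_diff L im iM hc hiMlt
  · have h1 : (iM:Int) < (im:Int) := by omega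
    have h2 : ¬ (((im : Nat) : Int) ≤ ((iM : Nat) : Int)) := by omega
    simp only [h1, h2, if_pos, if_false]
    rw [hBalt iM im (by omega) himlt]
    exact window_eq_pref_diff L iM im (by omega) himlt
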